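-- pv_equiv track=rewrite | github.com/OceanParkHongKong/pcs | utils/crop_images.py | get_crop_box_from_rectangle
-- ===== SOURCE A (Python) =====
-- def get_crop_box_from_rectangle(coordinates):
--     """Convert rectangle coordinates to PIL crop box (left, top, right, bottom)"""
--     if len(coordinates) != 4:
--         raise ValueError("Rectangle must have exactly 4 corner points")
--
--     # Extract x and y coordinates
--     x_coords = [coord[0] for coord in coordinates]
--     y_coords = [coord[1] for coord in coordinates]
--
--     # Calculate crop box
--     left = min(x_coords)
--     top = min(y_coords)
--     right = max(x_coords)
--     bottom = max(y_coords)
--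
--     return (left, top, right, bottom)
-- ===== SOURCE B (Python) =====
-- def get_crop_box_from_rectangle(coordinates):
--     """Convert rectangle coordinates to PIL crop box (left, top, right, bottom)"""
--     if len(coordinates) != 4:
--         raise ValueError("Rectangle must have exactly 4 corner points")
--     x0, y0 = coordinates[0]
--     left = right = x0
--     top = bottom = y0
--     for x, y in coordinates[1:]:
--         if x < left:
--             left = x
--         if x > right:
--             right = x
--         if y < top:
--             top = y
--         if y > bottom:
--             bottom = y
--     return (left, top, right, bottom)
-- ===== Notes on version B (the rewrite author's own statement) =====
-- stated objective: alternative
-- what changed: Replaces the two coordinate-projection list comprehensions and the four separate min/max reduction calls by a single accumulator pass over the raw points that maintains (left, top, right, bottom) with direct comparisons.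
import Mathlib
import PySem

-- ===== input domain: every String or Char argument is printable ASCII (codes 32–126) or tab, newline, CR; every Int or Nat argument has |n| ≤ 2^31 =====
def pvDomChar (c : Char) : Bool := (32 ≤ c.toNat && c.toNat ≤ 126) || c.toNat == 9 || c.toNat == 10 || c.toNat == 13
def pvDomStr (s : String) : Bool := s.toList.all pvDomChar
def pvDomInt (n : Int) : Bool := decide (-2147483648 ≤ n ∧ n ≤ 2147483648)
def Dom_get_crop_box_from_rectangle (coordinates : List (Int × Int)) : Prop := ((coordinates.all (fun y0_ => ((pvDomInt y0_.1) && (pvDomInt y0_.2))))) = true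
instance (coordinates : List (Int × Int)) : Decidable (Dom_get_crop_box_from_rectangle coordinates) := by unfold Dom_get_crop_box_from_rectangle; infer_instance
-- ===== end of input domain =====

-- ===== PORT A =====
-- Python min(xs)/max(xs) on a nonempty list; [] is unreachable under Pre_ (length = 4)
def pyMin (xs : List Int) : Int := match xs with | [] => 0 | a :: t => t.foldl min a
def pyMax (xs : List Int) : Int := match xs with | [] => 0 | a :: t => t.foldl max a

def get_crop_box_from_rectangle (coordinates : List (Int × Int)) : Int × Int × Int × Int :=
  if coordinates.length ≠ 4 then (0, 0, 0, 0)  -- Python raises ValueError here; excluded by Pre_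
  else
    let x_coords := coordinates.map (fun coord => coord.1)
    let y_coords := coordinates.map (fun coord => coord.2)
    let left := pyMin x_coords
    let top := pyMin y_coords
    let right := pyMax x_coords
    let bottom := pyMax y_coords
    (left, top, right, bottom)

-- ===== PORT B =====
def get_crop_box_from_rectangle_alt (coordinates : List (Int × Int)) : Int × Int × Int × Int :=
  if coordinates.length ≠ 4 then (0, 0, 0, 0)  -- Python raises ValueError here; excluded by Pre_
  else
    match coordinates with
    | [] => (0, 0, 0, 0)  -- unreachable: length = 4
    | (x0, y0) :: rest =>
      rest.foldl
        (fun acc p =>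
          let l := if p.1 < acc.1 then p.1 else acc.1
          let t := if p.2 < acc.2.1 then p.2 else acc.2.1
          let r := if p.1 > acc.2.2.1 then p.1 else acc.2.2.1
          let b := if p.2 > acc.2.2.2 then p.2 else acc.2.2.2
          (l, t, r, b))
        (x0, y0, x0, y0)

-- ===== PRECONDITION & SPEC =====
-- B: one accumulator pass over the raw points instead of two projections plus four min/max reductions (alternative decomposition, same cost).
-- Pre_: Python A raises ValueError unless there are exactly 4 points
def Pre_get_crop_box_from_rectangle (coordinates : List (Int × Int)) : Prop := coordinates.length = 4
instance (coordinates : List (Int × Int)) : Decidable (Pre_get_crop_box_from_rectangle coordinates) := by unfold Pre_get_crop_box_from_rectangle; infer_instance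
def pvWitness_get_crop_box_from_rectangle : (List (Int × Int)) := [(1, 2), (5, 2), (5, 7), (1, 7)]

def Spec_get_crop_box_from_rectangle (coordinates : List (Int × Int)) (out : Int × Int × Int × Int) : Prop := out = get_crop_box_from_rectangle_alt coordinates
instance (coordinates : List (Int × Int)) (out : Int × Int × Int × Int) : Decidable (Spec_get_crop_box_from_rectangle coordinates out) := by unfold Spec_get_crop_box_from_rectangle; infer_instance

-- ===== CLAIM (what is proved, stated in full; the proofs are below) =====
def Claim_equal_get_crop_box_from_rectangle : Prop := ∀ (coordinates : List (Int × Int)), Dom_get_crop_box_from_rectangle coordinates → Pre_get_crop_box_from_rectangle coordinates → Spec_get_crop_box_from_rectangle coordinates (get_crop_box_from_rectangle coordinates)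

-- ===== LEMMAS AND PROOFS =====

-- ===== VERDICT (by name: the statement is the Claim_ definition above) =====
theorem get_crop_box_from_rectangle_spec : Claim_equal_get_crop_box_from_rectangle := by
  intro coordinates _ hpre
  unfold Pre_get_crop_box_from_rectangle at hpre
  match coordinates, hpre with
  | [(x0, y0), (x1, y1), (x2, y2), (x3, y3)], _ =>
    unfold Spec_get_crop_box_from_rectangle get_crop_box_from_rectangle get_crop_box_from_rectangle_alt pyMin pyMax
    simp only [List.length_cons, List.length_nil, List.map, List.foldl]
    norm_num
    refine ⟨?_, ?_, ?_, ?_⟩ <;> split_ifs <;> omega
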